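-- pv_equiv track=rewrite | github.com/Katharos15/transeurasian-goblin | transeurasian-script.py | greedy_transcription
-- ===== SOURCE A (Python) =====
-- def greedy_transcription(text, transcription_dict):
--     result = []
--     i = 0
--     while i < len(text):
--         match = None
--         for j in range(len(text), i, -1):
--             substring = text[i:j]
--             if substring in transcription_dict:
--                 match = transcription_dict[substring]
--                 result.append(match)
--                 i = j - 1
--                 break
--         if match is None:
--             result.append(text[i])
--         i += 1
--     return ''.join(result)
-- ===== SOURCE B (Python) =====
-- def greedy_transcription(text, transcription_dict):
--     # Build a trie of the keys once (terminal marker None holds the value),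
--     # then scan: at each position descend the trie tracking the deepest terminal.
--     root = {}
--     for key, val in transcription_dict.items():
--         if not key:
--             continue
--         node = root
--         for ch in key:
--             node = node.setdefault(ch, {})
--         if None not in node:
--             node[None] = val
--     out = []
--     n = len(text)
--     i = 0
--     while i < n:
--         node = root
--         best = None  # (length, value) of deepest terminal seen
--         j = i
--         while j < n and text[j] in node:
--             node = node[text[j]]
--             j += 1
--             if None in node:
--                 best = (j - i, node[None])
--         if best is None:
--             out.append(text[i])
--             i += 1
--         else:
--             out.append(best[1])
--             i += best[0]
--     return ''.join(out)
-- ===== Notes on version B (the rewrite author's own statement) =====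
-- stated objective: faster
-- what changed: B builds a trie of the keys once and finds each longest match by a single left-to-right trie descent that records the deepest terminal node, instead of slicing and dict-probing every end index j from len(text) down to i+1 at every position.
import Mathlib
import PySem

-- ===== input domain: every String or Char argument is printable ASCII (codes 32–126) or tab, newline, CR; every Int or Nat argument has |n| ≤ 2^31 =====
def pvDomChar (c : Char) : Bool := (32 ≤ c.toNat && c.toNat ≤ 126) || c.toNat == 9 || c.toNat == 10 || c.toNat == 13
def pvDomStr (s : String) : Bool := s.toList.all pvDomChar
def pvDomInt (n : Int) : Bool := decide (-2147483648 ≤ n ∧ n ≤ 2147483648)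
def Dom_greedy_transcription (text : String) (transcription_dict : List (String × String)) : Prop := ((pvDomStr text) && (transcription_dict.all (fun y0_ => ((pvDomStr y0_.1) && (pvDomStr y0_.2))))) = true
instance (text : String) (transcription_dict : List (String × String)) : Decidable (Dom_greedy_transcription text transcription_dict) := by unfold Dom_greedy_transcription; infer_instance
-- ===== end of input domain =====

-- B builds a trie of the keys once and finds each longest match by a single trie
-- descent, instead of dict-probing every end index j at every position (faster).

-- ===== PORT A =====
-- first-match lookup in the association list = Python's `s in d` / `d[s]`
def pvLookup : List (String × String) → String → Option String
  | [], _ => none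
  | (k, v) :: rest, s => if k = s then some v else pvLookup rest s

-- text[i:j] — exact Python slice for 0 ≤ i ≤ j ≤ len(text) (the only indices the loops use)
def pvSub (cs : List Char) (i j : Nat) : String := String.ofList ((cs.drop i).take (j - i))

-- range(n, i, -1) — exact for i ≤ n: [n, n-1, …, i+1]
def pvDownTo (n i : Nat) : List Nat := (List.range' (i+1) (n - i)).reverse

-- inner `for j in range(len(text), i, -1): if substring in d: match = d[substring]; break`
def gtAInner (cs : List Char) (d : List (String × String)) (i : Nat) : List Nat → Option (String × Nat)
  | [] => none
  | j :: js =>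
    match pvLookup d (pvSub cs i j) with
    | some v => some (v, j)
    | none => gtAInner cs d i js

-- the while loop; fuel = remaining upper bound on iterations (i strictly increases each pass);
-- `i = j - 1` followed by `i += 1` is the jump to j
def gtALoop (cs : List Char) (d : List (String × String)) (i fuel : Nat) : List String :=
  match fuel with
  | 0 => []
  | fuel + 1 =>
    if h : i < cs.length then
      match gtAInner cs d i (pvDownTo cs.length i) with
      | some (v, j) => v :: gtALoop cs d j fuel
      | none => String.ofList [cs[i]] :: gtALoop cs d (i+1) fuel
    else []

def greedy_transcription (text : String) (transcription_dict : List (String × String)) : String :=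
  String.join (gtALoop text.toList transcription_dict 0 text.toList.length)

-- ===== PORT B =====
-- a trie node: optional terminal value + children (explicit child list, mutual pair)
mutual
  inductive Trie : Type where
    | mk : Option String → Kids → Trie
  inductive Kids : Type where
    | nil : Kids
    | cons : Char → Trie → Kids → Kids
end

def emptyTrie : Trie := .mk none .nil

def trieTerm : Trie → Option String | .mk t _ => t
def trieKids : Trie → Kids | .mk _ k => k

-- `text[j] in node` / `node[text[j]]`
def kidsFind : Kids → Char → Option Trie
  | .nil, _ => none
  | .cons c' t ks, c => if c' = c then some t else kidsFind ks c

-- `node = node.setdefault(ch, {})` followed by the rest of the insertion (f)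
def kidsModify : Kids → Char → (Trie → Trie) → Kids
  | .nil, c, f => .cons c (f emptyTrie) .nil
  | .cons c' t ks, c, f => if c' = c then .cons c' (f t) ks else .cons c' t (kidsModify ks c f)

-- insert one (key, value): descend/create per char; `if None not in node: node[None] = val`
def trieInsert : Trie → List Char → String → Trie
  | .mk term kids, [], v => .mk (match term with | none => some v | some w => some w) kids
  | .mk term kids, c :: cs, v => .mk term (kidsModify kids c (fun t => trieInsert t cs v))

-- the build loop over the items (empty keys skipped)
def buildTrie (d : List (String × String)) : Trie :=
  d.foldl (fun acc kv => if kv.1.toList = [] then acc else trieInsert acc kv.1.toList kv.2) emptyTrie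

-- inner `while j < n and text[j] in node: …` on the remaining suffix;
-- len = j - i consumed so far, best = deepest terminal seen
def gtBWalk : Trie → List Char → Nat → Option (Nat × String) → Option (Nat × String)
  | _, [], _, best => best
  | t, c :: rest, len, best =>
    match kidsFind (trieKids t) c with
    | none => best
    | some t' =>
      gtBWalk t' rest (len + 1)
        (match trieTerm t' with | some v => some (len + 1, v) | none => best)

-- the outer while loop of B (fuel as in A's port)
def gtBLoop (root : Trie) (cs : List Char) (i fuel : Nat) : List String :=
  match fuel with
  | 0 => []
  | fuel + 1 =>
    if h : i < cs.length then
      match gtBWalk root (cs.drop i) 0 none with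
      | some (len, v) => v :: gtBLoop root cs (i + len) fuel
      | none => String.ofList [cs[i]] :: gtBLoop root cs (i+1) fuel
    else []

def greedy_transcription_alt (text : String) (transcription_dict : List (String × String)) : String :=
  String.join (gtBLoop (buildTrie transcription_dict) text.toList 0 text.toList.length)

-- ===== PRECONDITION & SPEC =====
def Spec_greedy_transcription (text : String) (transcription_dict : List (String × String)) (out : String) : Prop := out = greedy_transcription_alt text transcription_dict
instance (text : String) (transcription_dict : List (String × String)) (out : String) : Decidable (Spec_greedy_transcription text transcription_dict out) := by unfold Spec_greedy_transcription; infer_instance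

-- ===== CLAIM (what is proved, stated in full; the proofs are below) =====
def Claim_equal_greedy_transcription : Prop := ∀ (text : String) (transcription_dict : List (String × String)), Dom_greedy_transcription text transcription_dict → Spec_greedy_transcription text transcription_dict (greedy_transcription text transcription_dict)

-- ===== LEMMAS AND PROOFS =====

-- full lookup in the trie: follow the chars, return the terminal reached
def trieGet : Trie → List Char → Option String
  | t, [] => trieTerm t
  | t, c :: cs =>
    match kidsFind (trieKids t) c with
    | none => none
    | some t' => trieGet t' cs

theorem kidsFind_kidsModify : ∀ (ks : Kids) (c c' : Char) (f : Trie → Trie),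
    kidsFind (kidsModify ks c f) c' =
      if c' = c then some (f ((kidsFind ks c).getD emptyTrie)) else kidsFind ks c'
  | .nil, c, c', f => by
    by_cases h : c' = c <;> simp [kidsModify, kidsFind, h, Ne.symm]
  | .cons a t ks, c, c', f => by
    have ih := kidsFind_kidsModify ks c c' f
    by_cases hac : a = c
    · subst hac
      by_cases h : c' = a <;> simp [kidsModify, kidsFind, h, Ne.symm, ih]
    · by_cases h : c' = a
      · subst h
        simp [kidsModify, kidsFind, hac, Ne.symm hac, ih]
      · simp only [kidsModify, if_neg hac, kidsFind, ih]
        by_cases hcc : c' = c <;> simp [hcc, Ne.symm h, hac]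

theorem trieGet_child (t : Trie) (c : Char) (ls : List Char) :
    trieGet ((kidsFind (trieKids t) c).getD emptyTrie) ls = trieGet t (c :: ls) := by
  obtain ⟨term, kids⟩ := t
  cases hf : kidsFind kids c with
  | none => cases ls <;> simp [trieGet, trieKids, hf, emptyTrie, trieTerm, kidsFind]
  | some t' => simp [trieGet, trieKids, hf]

theorem trieGet_insert (ks : List Char) (v : String) :
    ∀ (t : Trie) (ls : List Char),
    trieGet (trieInsert t ks v) ls =
      if ls = ks then some ((trieGet t ks).getD v) else trieGet t ls := by
  induction ks with
  | nil =>
    intro t ls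
    obtain ⟨term, kids⟩ := t
    cases ls with
    | nil => cases term <;> simp [trieInsert, trieGet, trieTerm]
    | cons c ls => cases term <;> simp [trieInsert, trieGet, trieTerm, trieKids]
  | cons k ks ih =>
    intro t ls
    obtain ⟨term, kids⟩ := t
    cases ls with
    | nil => simp [trieInsert, trieGet, trieTerm]
    | cons c ls =>
      simp only [trieInsert, trieGet, trieKids, kidsFind_kidsModify]
      by_cases hck : c = k
      · subst hck
        rw [if_pos rfl]
        have h1 := trieGet_child (Trie.mk term kids) c ks
        have h2 := trieGet_child (Trie.mk term kids) c ls
        simp only [trieKids] at h1 h2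
        change trieGet (trieInsert ((kidsFind kids c).getD emptyTrie) ks v) ls = _
        rw [ih, h1, h2]
        by_cases h : ls = ks <;> simp [h, trieGet, trieKids]
      · rw [if_neg hck]
        have hne : (c :: ls ≠ k :: ks) := by simp [hck]
        rw [if_neg hne]

theorem trieGet_empty (ls : List Char) : trieGet emptyTrie ls = none := by
  cases ls <;> simp [trieGet, emptyTrie, trieTerm, trieKids, kidsFind]

theorem trieGet_build_aux (d : List (String × String)) :
    ∀ (t : Trie) (ls : List Char), ls ≠ [] →
    trieGet (d.foldl (fun acc kv => if kv.1.toList = [] then acc else trieInsert acc kv.1.toList kv.2) t) ls =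
      match trieGet t ls with
      | some w => some w
      | none => pvLookup d (String.ofList ls) := by
  induction d with
  | nil => intro t ls _; cases h : trieGet t ls <;> simp [pvLookup, h]
  | cons kv rest ih =>
    intro t ls hne
    obtain ⟨k, v⟩ := kv
    simp only [List.foldl_cons]
    by_cases hk : k.toList = []
    · rw [if_pos hk, ih _ _ hne]
      have hkne : k ≠ String.ofList ls := by
        intro h; apply hne
        have := congrArg String.toList h
        simp [hk] at this; exact this
      cases trieGet t ls <;> simp [pvLookup, hkne]
    · rw [if_neg hk, ih _ _ hne, trieGet_insert]
      by_cases hls : ls = k.toList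
      · subst hls
        have hkeq : k = String.ofList k.toList := by simp
        cases hg : trieGet t k.toList with
        | some w => simp [pvLookup, ← hkeq]
        | none => simp [pvLookup, ← hkeq]
      · rw [if_neg hls]
        have hkne : k ≠ String.ofList ls := by
          intro h; apply hls
          have := congrArg String.toList h
          simp at this; exact this.symm
        cases trieGet t ls <;> simp [pvLookup, hkne]

-- trie lookup = first-match association-list lookup, for non-empty keys
theorem trieGet_build (d : List (String × String)) (ls : List Char) (hne : ls ≠ []) :
    trieGet (buildTrie d) ls = pvLookup d (String.ofList ls) := by
  rw [buildTrie, trieGet_build_aux d emptyTrie ls hne, trieGet_empty]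

theorem pvDownTo_zero_succ (m : Nat) :
    pvDownTo (m+1) 0 = ((pvDownTo m 0) ++ [0]).map (· + 1) := by
  simp only [pvDownTo, Nat.sub_zero]
  rw [← List.reverse_cons]
  have h : (0 : Nat) :: List.range' 1 m = List.range' 0 (m+1) := by
    rw [List.range'_succ]
  rw [h, List.map_reverse]
  congr 1
  have h2 : List.map (fun x => 1 + x) (List.range' 0 (m+1)) = List.range' (1+0) (m+1) :=
    List.map_add_range' 0 (m+1) 1
  simp only [Nat.add_zero] at h2
  rw [← h2]
  congr 1
  funext x
  omega

-- the trie walk finds the deepest terminal = the first length L (descending) with a match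
theorem gtBWalk_eq_find :
    ∀ (suf : List Char) (t : Trie) (len : Nat) (best : Option (Nat × String)),
    gtBWalk t suf len best =
      match (pvDownTo suf.length 0).find? (fun L => (trieGet t (suf.take L)).isSome) with
      | some L => (trieGet t (suf.take L)).map (fun v => (len + L, v))
      | none => best := by
  intro suf
  induction suf with
  | nil => intro t len best; simp [gtBWalk, pvDownTo]
  | cons c rest ih =>
    intro t len best
    rw [show (c :: rest).length = rest.length + 1 from rfl, pvDownTo_zero_succ,
        List.find?_map, List.find?_append]
    cases hf : kidsFind (trieKids t) c with
    | none =>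
      have hall : ∀ X, trieGet t (c :: X) = none := by
        intro X; simp [trieGet, hf]
      have h1 : (pvDownTo rest.length 0).find? ((fun L => (trieGet t ((c :: rest).take L)).isSome) ∘ (· + 1)) = none :=
        List.find?_eq_none.mpr (fun x _ => by simp [Function.comp, List.take_succ_cons, hall])
      have h2 : List.find? ((fun L => (trieGet t ((c :: rest).take L)).isSome) ∘ (· + 1)) [0] = none := by
        simp [List.find?, Function.comp, List.take_succ_cons, hall]
      rw [h1, h2]
      simp [gtBWalk, hf]
    | some t' =>
      have hstep : ∀ X, trieGet t (c :: X) = trieGet t' X := by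
        intro X; simp [trieGet, hf]
      simp only [gtBWalk, hf]
      rw [ih]
      have hcomp : ((fun L => (trieGet t ((c :: rest).take L)).isSome) ∘ (· + 1)) =
          (fun L => (trieGet t' (rest.take L)).isSome) := by
        funext L; simp [Function.comp, List.take_succ_cons, hstep]
      rw [hcomp]
      cases hfd : (pvDownTo rest.length 0).find? (fun L => (trieGet t' (rest.take L)).isSome) with
      | some L =>
        simp only [Option.some_or, Option.map_some]
        cases hx : trieGet t' (rest.take L) with
        | none => simp [hx, List.take_succ_cons, hstep]
        | some v =>
          simp [hx, List.take_succ_cons, hstep]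
          omega
      | none =>
        simp only [Option.none_or]
        cases hterm : trieTerm t' with
        | some v =>
          have hget : trieGet t' [] = some v := by
            cases t' <;> simpa [trieGet, trieTerm] using hterm
          have hfind : List.find? (fun L => (trieGet t' (rest.take L)).isSome) [0] = some 0 := by
            simp [List.find?, List.take_zero, hget]
          rw [hfind]
          simp [List.take_succ_cons, hstep, List.take_zero, hget]
        | none =>
          have hget : trieGet t' [] = none := by
            cases t' <;> simpa [trieGet, trieTerm] using hterm
          have hfind : List.find? (fun L => (trieGet t' (rest.take L)).isSome) [0] = none := by
            simp [List.find?, List.take_zero, hget]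
          rw [hfind]
          simp

-- descending end indices (i, n] = i + descending lengths (0, n-i]
theorem pvDownTo_shift (n i : Nat) (h : i ≤ n) :
    pvDownTo n i = (pvDownTo (n - i) 0).map (i + ·) := by
  simp only [pvDownTo, Nat.sub_zero]
  rw [List.map_reverse]
  congr 1
  have h2 : List.map (fun x => i + x) (List.range' 1 (n - i)) = List.range' (i+1) (n - i) :=
    List.map_add_range' 1 (n - i) 1
  exact h2.symm

theorem find?_congr_mem {α : Type} (l : List α) (p q : α → Bool)
    (h : ∀ x ∈ l, p x = q x) : l.find? p = l.find? q := by
  induction l with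
  | nil => rfl
  | cons a l ih =>
    simp only [List.find?]
    rw [h a (List.mem_cons_self ..)]
    cases q a with
    | true => rfl
    | false => exact ih (fun x hx => h x (List.mem_cons_of_mem _ hx))

theorem mem_pvDownTo {n i j : Nat} : j ∈ pvDownTo n i ↔ i < j ∧ j ≤ n := by
  unfold pvDownTo
  constructor
  · intro h; simp [List.mem_range'] at h; omega
  · intro h; simp [List.mem_range']; exact ⟨j - (i+1), by omega, by omega⟩

theorem gtAInner_eq (cs : List Char) (d : List (String × String)) (i : Nat) (js : List Nat) :
    gtAInner cs d i js =
      (js.find? (fun j => (pvLookup d (pvSub cs i j)).isSome)).bind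
        (fun j => (pvLookup d (pvSub cs i j)).map (fun v => (v, j))) := by
  induction js with
  | nil => rfl
  | cons j js ih =>
    cases h : pvLookup d (pvSub cs i j) with
    | some v => simp [gtAInner, h]
    | none => simp [gtAInner, h, ih]

-- the two inner searches agree: A's first matching end index j = i + B's walk length
theorem inner_bridge (cs : List Char) (d : List (String × String)) (i : Nat) (hi : i < cs.length) :
    gtAInner cs d i (pvDownTo cs.length i) =
      (gtBWalk (buildTrie d) (cs.drop i) 0 none).map (fun p => (p.2, i + p.1)) := by
  rw [gtAInner_eq, gtBWalk_eq_find, pvDownTo_shift cs.length i (le_of_lt hi), List.find?_map]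
  have hlen : (cs.drop i).length = cs.length - i := by simp
  have hpred : ∀ L ∈ pvDownTo (cs.length - i) 0,
      ((fun j => (pvLookup d (pvSub cs i j)).isSome) ∘ (i + ·)) L =
      (fun L => (trieGet (buildTrie d) ((cs.drop i).take L)).isSome) L := by
    intro L hL
    obtain ⟨hL1, _⟩ := mem_pvDownTo.mp hL
    simp only [Function.comp]
    by_cases hemp : (cs.drop i).take L = []
    · exfalso
      have hley := congrArg List.length hemp
      simp [hlen] at hley
      omega
    · have harg : pvSub cs i (i + L) = String.ofList ((cs.drop i).take L) := by
        simp [pvSub, Nat.add_sub_cancel_left]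
      rw [trieGet_build d _ hemp, harg]
  rw [← hlen]
  rw [find?_congr_mem _ _ _ (by intro x hx; exact (hpred x (by rwa [hlen] at hx)))]
  cases hfd : (pvDownTo (cs.drop i).length 0).find? (fun L => (trieGet (buildTrie d) ((cs.drop i).take L)).isSome) with
  | none => simp
  | some L =>
    have hmem := List.mem_of_find?_eq_some hfd
    rw [hlen] at hmem
    obtain ⟨hL1, hL2⟩ := mem_pvDownTo.mp hmem
    have hemp : (cs.drop i).take L ≠ [] := by
      intro h
      have := congrArg List.length h
      simp [hlen] at this
      omega
    have hget : trieGet (buildTrie d) ((cs.drop i).take L) = pvLookup d (pvSub cs i (i + L)) := by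
      have harg : pvSub cs i (i + L) = String.ofList ((cs.drop i).take L) := by
        simp [pvSub, Nat.add_sub_cancel_left]
      rw [trieGet_build d _ hemp, harg]
    cases hx : pvLookup d (pvSub cs i (i + L)) with
    | none => simp [hget, hx]
    | some v => simp [hget, hx]

theorem loop_bridge (cs : List Char) (d : List (String × String)) :
    ∀ fuel i, gtALoop cs d i fuel = gtBLoop (buildTrie d) cs i fuel := by
  intro fuel
  induction fuel with
  | zero => intro i; rfl
  | succ fuel ih =>
    intro i
    by_cases hi : i < cs.length
    · have hb := inner_bridge cs d i hi
      cases hB : gtBWalk (buildTrie d) (cs.drop i) 0 none with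
      | none =>
        rw [hB] at hb
        simp only [Option.map_none] at hb
        simp [gtALoop, gtBLoop, hi, hb, hB, ih]
      | some p =>
        obtain ⟨len, v⟩ := p
        rw [hB] at hb
        simp only [Option.map_some] at hb
        simp [gtALoop, gtBLoop, hi, hb, hB, ih]
    · simp [gtALoop, gtBLoop, hi]

-- ===== VERDICT (by name: the statement is the Claim_ definition above) =====
theorem greedy_transcription_spec : Claim_equal_greedy_transcription := by
  intro text d _hdom
  unfold Spec_greedy_transcription greedy_transcription greedy_transcription_alt
  rw [loop_bridge text.toList d text.toList.length 0]
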